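-- pv_equiv track=rewrite | github.com/hiraku00/AtCoder-Practice | AlgorithmAndMath/2nd/048.py | find_min_digit_sum
-- ===== SOURCE A (Python) =====
-- from collections import deque
--
-- def find_min_digit_sum(K):
--     # 初期化：全ての位置について、最小桁和を無限大に設定
--     dist = [10**9] * K
--     # 1の位置の最小桁和を1に設定
--     dist[1] = 1
--     q = deque()
--     q.append(1)
--     while q:
--         pos = q.popleft()
--         # 現在の位置から1増やす操作（u）と10倍する操作（v）を考える
--         u = (pos + 1) % K
--         v = 10 * pos % K
--
--         # uへの移動が可能（最小桁和が更新される）ならば、distとキューを更新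
--         if dist[u] > dist[pos] + 1:
--             dist[u] = dist[pos] + 1
--             q.append(u)
--
--         # vへの移動が可能（最小桁和が更新される）ならば、distとキューを更新
--         if dist[v] > dist[pos]:
--             dist[v] = dist[pos]
--             q.append(v)
--     return dist[0]
-- ===== SOURCE B (Python) =====
-- def find_min_digit_sum(K):
--     # Bellman-Ford style: repeated full relaxation sweeps over all residues
--     # until a fixpoint, instead of a worklist/deque (SPFA).
--     dist = [10**9] * K
--     dist[1] = 1
--     changed = True
--     while changed:
--         changed = False
--         for pos in range(K):
--             u = (pos + 1) % K
--             if dist[pos] + 1 < dist[u]: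
--                 dist[u] = dist[pos] + 1
--                 changed = True
--             v = 10 * pos % K
--             if dist[pos] < dist[v]:
--                 dist[v] = dist[pos]
--                 changed = True
--     return dist[0]
-- ===== Notes on version B (the rewrite author's own statement) =====
-- stated objective: alternative
-- what changed: Replaces the SPFA worklist/deque with repeated full relaxation sweeps over all K residues until no distance changes (Bellman-Ford style), eliminating the queue entirely.
-- outside the precondition, e.g. on find_min_digit_sum(1): A raises IndexError, B raises IndexError
import Mathlib
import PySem

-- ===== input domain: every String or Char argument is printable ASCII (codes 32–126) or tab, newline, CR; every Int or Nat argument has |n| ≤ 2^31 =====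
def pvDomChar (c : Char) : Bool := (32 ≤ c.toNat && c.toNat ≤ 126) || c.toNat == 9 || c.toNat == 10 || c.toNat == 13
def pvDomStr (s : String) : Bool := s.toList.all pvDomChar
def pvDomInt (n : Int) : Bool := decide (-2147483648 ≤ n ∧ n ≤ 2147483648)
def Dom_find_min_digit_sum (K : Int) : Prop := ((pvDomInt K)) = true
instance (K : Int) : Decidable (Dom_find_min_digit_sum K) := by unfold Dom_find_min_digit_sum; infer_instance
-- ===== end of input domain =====

-- B replaces A's SPFA worklist/deque with repeated full relaxation sweeps until a
-- fixpoint (Bellman-Ford style); same return value on every K ≥ 2, not claimed faster.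

-- dist[i] read/write: Python list indexing with an in-range, nonnegative index
-- (every index used is `x % K` with K > 0, or 0/1 guarded by Pre_), made total
-- with a default that is never taken on such indices.
def dget (d : Array Int) (i : Int) : Int := d.getD i.toNat 0
def dset (d : Array Int) (i v : Int) : Array Int := d.setIfInBounds i.toNat v

-- ===== PORT A =====
-- SPFA over residues mod K.  The while-loop is ported with a fuel parameter that is
-- provably larger than the number of iterations (each iteration strictly decreases
-- sum-of-distances + queue-length); the fuel branch is a totality guard only.
-- Python's list reads/writes dist[i] go through dget/dset above: for K ≥ 2 every index
-- used is in range and nonnegative (shown in the proofs), where they are exact.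
def spfaLoop (K : Int) (fuel : Nat) (dist : Array Int) (q : List Int) : Array Int :=
  match fuel, q with
  | 0, _ => dist
  | _ + 1, [] => dist
  | fuel + 1, pos :: qs =>
    let u := PySem.Int.mod (pos + 1) K
    let v := PySem.Int.mod (10 * pos) K
    let s1 :=
      if dget dist u > dget dist pos + 1 then
        (dset dist u (dget dist pos + 1), qs ++ [u])
      else (dist, qs)
    let s2 :=
      if dget s1.1 v > dget s1.1 pos then
        (dset s1.1 v (dget s1.1 pos), s1.2 ++ [v])
      else s1
    spfaLoop K fuel s2.1 s2.2

def find_min_digit_sum (K : Int) : Int :=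
  let dist := Array.replicate K.toNat (1000000000 : Int)
  let dist := dset dist 1 1
  dget (spfaLoop K (K.toNat * 1000000000 + 2) dist [1]) 0

-- ===== PORT B =====
-- one pass of `for pos in range(K)`, threading (dist, changed)
def sweepStep (K : Int) (st : Array Int × Bool) (pos : Int) : Array Int × Bool :=
  let u := PySem.Int.mod (pos + 1) K
  let s1 :=
    if dget st.1 pos + 1 < dget st.1 u then
      (dset st.1 u (dget st.1 pos + 1), true)
    else st
  let v := PySem.Int.mod (10 * pos) K
  if dget s1.1 pos < dget s1.1 v then
    (dset s1.1 v (dget s1.1 pos), true)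
  else s1

-- the `while changed` loop, with fuel as a totality guard (each sweep that reports a
-- change strictly decreases the sum of distances, which the initial fuel dominates)
def bLoop (K : Int) (fuel : Nat) (dist : Array Int) : Array Int :=
  match fuel with
  | 0 => dist
  | fuel + 1 =>
    let st := (PySem.List.pyRange 0 K 1).foldl (sweepStep K) (dist, false)
    if st.2 then bLoop K fuel st.1 else st.1

def find_min_digit_sum_alt (K : Int) : Int :=
  let dist := dset (Array.replicate K.toNat (1000000000 : Int)) 1 1
  dget (bLoop K (K.toNat * 1000000000 + 2) dist) 0

-- ===== PRECONDITION & SPEC =====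
-- For K ≤ 1 the Python A raises IndexError at `dist[1] = 1` (and so does B).
def Pre_find_min_digit_sum (K : Int) : Prop := 2 ≤ K
instance (K : Int) : Decidable (Pre_find_min_digit_sum K) := by unfold Pre_find_min_digit_sum; infer_instance
def pvWitness_find_min_digit_sum : Int := (7)

def Spec_find_min_digit_sum (K : Int) (out : Int) : Prop := out = find_min_digit_sum_alt K
instance (K : Int) (out : Int) : Decidable (Spec_find_min_digit_sum K out) := by unfold Spec_find_min_digit_sum; infer_instance

-- ===== CLAIM (what is proved, stated in full; the proofs are below) =====
def Claim_equal_find_min_digit_sum : Prop := ∀ (K : Int), Dom_find_min_digit_sum K → Pre_find_min_digit_sum K → Spec_find_min_digit_sum K (find_min_digit_sum K)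

-- ===== LEMMAS AND PROOFS =====
def sumT (l : List Int) : Nat := (l.map Int.toNat).sum
def sumA (d : Array Int) : Nat := sumT d.toList

lemma dget_eq_getElem (d : Array Int) (i : Int) (h0 : 0 ≤ i) (h : i < (d.size : Int)) :
    dget d i = d[i.toNat]'(by omega) := by
  unfold dget
  rw [Array.getD_eq_getD_getElem?, Array.getElem?_eq_getElem (by omega)]
  rfl

lemma size_dset (d : Array Int) (i v : Int) : (dset d i v).size = d.size :=
  Array.size_setIfInBounds

lemma dget_dset (d : Array Int) (i j v : Int) (hi0 : 0 ≤ i) (_hi : i < (d.size : Int))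
    (hj0 : 0 ≤ j) (hj : j < (d.size : Int)) :
    dget (dset d i v) j = if j = i then v else dget d j := by
  unfold dset
  rw [dget_eq_getElem _ j hj0 (by simpa [Array.size_setIfInBounds] using hj),
    dget_eq_getElem d j hj0 hj]
  rw [Array.getElem_setIfInBounds (by omega)]
  split_ifs with h1 h2 h2 <;> first | rfl | omega

lemma sumT_set (d : List Int) (n : Nat) (v : Int) (h : n < d.length) :
    sumT (d.set n v) + (d[n]'h).toNat = sumT d + v.toNat := by
  induction d generalizing n with
  | nil => simp at h
  | cons a t ih =>
    cases n with
    | zero => simp [sumT]; omega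
    | succ m =>
      have hm : m < t.length := by simpa using h
      have := ih m hm
      simp only [List.set_cons_succ, sumT, List.map_cons, List.sum_cons,
        List.getElem_cons_succ] at this ⊢
      omega

lemma sumA_dset_lt (d : Array Int) (i v : Int) (hi0 : 0 ≤ i) (hi : i < (d.size : Int))
    (hv0 : 0 ≤ v) (hv : v < dget d i) : sumA (dset d i v) < sumA d := by
  unfold sumA dset
  rw [Array.toList_setIfInBounds]
  have h : i.toNat < d.toList.length := by simp; omega
  have hs := sumT_set d.toList i.toNat v h
  have he : d.toList[i.toNat]'h = d[i.toNat]'(by omega) := Array.getElem_toList h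
  rw [dget_eq_getElem d i hi0 hi] at hv
  rw [he] at hs
  omega

lemma sumA_pos (K : Int) (hK : 2 ≤ K) (d : Array Int) (hlen : d.size = K.toNat)
    (hent : ∀ j, 0 ≤ j → j < K → 1 ≤ dget d j) : 1 ≤ sumA d := by
  have h0 : 1 ≤ dget d 0 := hent 0 (le_refl 0) (by omega)
  rw [dget_eq_getElem d 0 (le_refl 0) (by omega)] at h0
  have hl : d.toList.length = K.toNat := by simp [hlen]
  unfold sumA
  match hdl : d.toList with
  | [] => rw [hdl] at hl; simp at hl; omega
  | a :: t =>
    simp only [Int.toNat_zero] at h0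
    have ha : a = d[(0:Nat)]'(by omega) := by
      rw [← Array.getElem_toList (xs := d) (i := 0) (by omega)]
      simp [hdl]
    have h0' : 1 ≤ a := by rw [ha]; exact h0
    simp only [sumT, List.map_cons, List.sum_cons]
    omega

def relaxedAt (K : Int) (d : Array Int) (pos : Int) : Prop :=
  dget d (PySem.Int.mod (pos + 1) K) ≤ dget d pos + 1 ∧
  dget d (PySem.Int.mod (10 * pos) K) ≤ dget d pos

def relaxedAll (K : Int) (d : Array Int) : Prop :=
  ∀ pos, 0 ≤ pos → pos < K → relaxedAt K d pos

def ple (K : Int) (a b : Array Int) : Prop :=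
  ∀ i, 0 ≤ i → i < K → dget a i ≤ dget b i

lemma ple_refl (K : Int) (a : Array Int) : ple K a a := fun _ _ _ => le_refl _

lemma ple_trans {K : Int} {a b c : Array Int} (h1 : ple K a b) (h2 : ple K b c) : ple K a c :=
  fun i h0 hK => le_trans (h1 i h0 hK) (h2 i h0 hK)

-- if the entry at pos is unchanged and all entries only decreased, relaxedAt is preserved
lemma relaxedAt_mono {K : Int} {d e : Array Int} {pos : Int} (hK : 0 < K)
    (hle : ple K e d) (hfix : dget e pos = dget d pos)
    (h : relaxedAt K d pos) : relaxedAt K e pos := by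
  obtain ⟨h1, h2⟩ := h
  constructor
  · exact le_trans (hle _ (PySem.Int.mod_nonneg _ hK) (PySem.Int.mod_lt _ hK)) (by omega)
  · exact le_trans (hle _ (PySem.Int.mod_nonneg _ hK) (PySem.Int.mod_lt _ hK)) (by omega)

-- the generic conditional relaxation step of A's loop body
lemma relax_step (K : Int) (hK : 0 < K) (d : Array Int) (q : List Int) (pos tgt w : Int)
    (hlen : d.size = K.toNat)
    (hent : ∀ j, 0 ≤ j → j < K → 1 ≤ dget d j)
    (hpos0 : 0 ≤ pos) (hposK : pos < K)
    (htgt0 : 0 ≤ tgt) (htgtK : tgt < K)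
    (hw : 0 ≤ w)
    (st : Array Int × List Int)
    (hst : st = if dget d pos + w < dget d tgt
                then (dset d tgt (dget d pos + w), q ++ [tgt])
                else (d, q)) :
    st.1.size = K.toNat ∧
    (∀ j, 0 ≤ j → j < K → 1 ≤ dget st.1 j) ∧
    ple K st.1 d ∧
    dget st.1 pos = dget d pos ∧
    dget st.1 tgt ≤ dget d pos + w ∧
    (∀ j, 0 ≤ j → j < K → dget st.1 j = dget d j ∨ j ∈ st.2) ∧
    (∀ x ∈ st.2, x ∈ q ∨ x = tgt) ∧
    (∀ x ∈ q, x ∈ st.2) ∧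
    (sumA st.1 + st.2.length ≤ sumA d + q.length) ∧
    (∀ d', relaxedAll K d' → ple K d' d → dget d' tgt ≤ dget d' pos + w → ple K d' st.1) := by
  have hlenI : (d.size : Int) = K := by omega
  have htgtI : tgt < (d.size : Int) := by omega
  have hdp1 : 1 ≤ dget d pos := hent pos hpos0 hposK
  by_cases hc : dget d pos + w < dget d tgt
  · -- fired
    simp only [hst, if_pos hc]
    have hget : ∀ j, 0 ≤ j → j < K →
        dget (dset d tgt (dget d pos + w)) j
          = if j = tgt then dget d pos + w else dget d j := by
      intro j hj0 hjK
      exact dget_dset d tgt j _ htgt0 htgtI hj0 (by omega)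
    have hnp : pos ≠ tgt := by
      intro h; rw [h] at hc; omega
    refine ⟨?_, ?_, ?_, ?_, ?_, ?_, ?_, ?_, ?_, ?_⟩
    · rw [size_dset]; exact hlen
    · intro j hj0 hjK
      rw [hget j hj0 hjK]
      split_ifs with h
      · omega
      · exact hent j hj0 hjK
    · intro j hj0 hjK
      rw [hget j hj0 hjK]
      split_ifs with h
      · subst h; omega
      · exact le_refl _
    · rw [hget pos hpos0 hposK, if_neg hnp]
    · rw [hget tgt htgt0 htgtK, if_pos rfl]
    · intro j hj0 hjK
      rw [hget j hj0 hjK]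
      split_ifs with h
      · right; simp [h]
      · left; rfl
    · intro x hx
      rcases List.mem_append.mp hx with h | h
      · exact Or.inl h
      · exact Or.inr (by simpa using h)
    · intro x hx; exact List.mem_append_left _ hx
    · have hsum := sumA_dset_lt d tgt (dget d pos + w) htgt0 htgtI (by omega) hc
      simp only [List.length_append, List.length_cons, List.length_nil]
      omega
    · intro d' hrel hled htri j hj0 hjK
      rw [hget j hj0 hjK]
      split_ifs with h
      · subst h
        exact le_trans htri (by have := hled pos hpos0 hposK; omega)
      · exact hled j hj0 hjK
  · -- not fired
    simp only [hst, if_neg hc]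
    refine ⟨hlen, hent, ple_refl K d, by trivial, by omega,
      fun j _ _ => Or.inl (by trivial), fun x hx => Or.inl hx, fun x hx => hx,
      by omega, fun d' _ hled _ => hled⟩

theorem spfa_main (K : Int) (hK : 2 ≤ K) :
    ∀ (fuel : Nat) (d : Array Int) (q : List Int),
    d.size = K.toNat →
    (∀ j, 0 ≤ j → j < K → 1 ≤ dget d j) →
    (∀ x ∈ q, 0 ≤ x ∧ x < K) →
    (∀ x, 0 ≤ x → x < K → relaxedAt K d x ∨ x ∈ q) →
    sumA d + q.length ≤ fuel →
    (spfaLoop K fuel d q).size = K.toNat ∧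
    relaxedAll K (spfaLoop K fuel d q) ∧
    ple K (spfaLoop K fuel d q) d ∧
    (∀ d', relaxedAll K d' → ple K d' d → ple K d' (spfaLoop K fuel d q)) := by
  intro fuel
  induction fuel with
  | zero =>
    intro d q hlen hent _ _ hsum
    exfalso
    have := sumA_pos K hK d hlen hent
    omega
  | succ fuel ih =>
    intro d q hlen hent hq hI hsum
    match q with
    | [] =>
      refine ⟨hlen, ?_, ple_refl K d, fun d' _ h => h⟩
      intro pos h0 hK'
      rcases hI pos h0 hK' with h | h
      · exact h
      · simp at h
    | pos :: qs =>
      have hK0 : (0:Int) < K := by omega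
      have hpos := hq pos (by simp)
      set u := PySem.Int.mod (pos + 1) K with hu_def
      set v := PySem.Int.mod (10 * pos) K with hv_def
      have hu0 : 0 ≤ u := PySem.Int.mod_nonneg _ hK0
      have huK : u < K := PySem.Int.mod_lt _ hK0
      have hv0 : 0 ≤ v := PySem.Int.mod_nonneg _ hK0
      have hvK : v < K := PySem.Int.mod_lt _ hK0
      set s1 := (if dget d pos + 1 < dget d u
          then (dset d u (dget d pos + 1), qs ++ [u]) else (d, qs)) with hs1
      obtain ⟨l1, e1, p1, f1, ed1, un1, qm1, qsup1, sum1, pres1⟩ :=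
        relax_step K hK0 d qs pos u 1 hlen hent hpos.1 hpos.2 hu0 huK (by omega) s1 hs1
      set s2 := (if dget s1.1 pos < dget s1.1 v
          then (dset s1.1 v (dget s1.1 pos), s1.2 ++ [v]) else s1) with hs2
      obtain ⟨l2, e2, p2, f2, ed2, un2, qm2, qsup2, sum2, pres2⟩ :=
        relax_step K hK0 s1.1 s1.2 pos v 0 l1 e1 hpos.1 hpos.2 hv0 hvK (le_refl 0) s2
          (by rw [hs2]; norm_num)
      have hunf : spfaLoop K (fuel+1) d (pos :: qs) = spfaLoop K fuel s2.1 s2.2 := by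
        rw [spfaLoop]
      have hq2 : ∀ x ∈ s2.2, 0 ≤ x ∧ x < K := by
        intro x hx
        rcases qm2 x hx with h | h
        · rcases qm1 x h with h' | h'
          · exact hq x (by simp [h'])
          · subst h'; exact ⟨hu0, huK⟩
        · subst h; exact ⟨hv0, hvK⟩
      have hI2 : ∀ x, 0 ≤ x → x < K → relaxedAt K s2.1 x ∨ x ∈ s2.2 := by
        intro x hx0 hxK
        by_cases hxp : x = pos
        · subst hxp
          left
          constructor
          · have h1 : dget s2.1 u ≤ dget s1.1 u := p2 u hu0 huK
            have h2 : dget s2.1 x = dget s1.1 x := f2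
            rw [← hu_def]
            omega
          · have h2 : dget s2.1 x = dget s1.1 x := f2
            rw [← hv_def]
            omega
        · rcases hI x hx0 hxK with hrel | hxq
          · rcases un2 x hx0 hxK with heq2 | hin2
            · rcases un1 x hx0 hxK with heq1 | hin1
              · left
                exact relaxedAt_mono hK0 (ple_trans p2 p1) (by omega) hrel
              · right; exact qsup2 x hin1
            · right; exact hin2
          · rcases List.mem_cons.mp hxq with h | h
            · exact absurd h hxp
            · right; exact qsup2 x (qsup1 x h)
      have hsum2 : sumA s2.1 + s2.2.length ≤ fuel := by
        simp only [List.length_cons] at hsum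
        omega
      obtain ⟨L, R, P, Pr⟩ := ih s2.1 s2.2 l2 e2 hq2 hI2 hsum2
      rw [hunf]
      refine ⟨L, R, ple_trans P (ple_trans p2 p1), ?_⟩
      intro d' hrel hled
      have hrp := hrel pos hpos.1 hpos.2
      have e1' : dget d' u ≤ dget d' pos + 1 := by rw [hu_def]; exact hrp.1
      have e2' : dget d' v ≤ dget d' pos + 0 := by rw [hv_def]; have := hrp.2; omega
      exact Pr d' hrel (pres2 d' hrel (pres1 d' hrel hled e1') e2')

-- the generic conditional relaxation of B's sweep body
lemma brelax (K : Int) (hK : 0 < K) (d : Array Int) (b : Bool) (pos tgt w : Int)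
    (hlen : d.size = K.toNat)
    (hent : ∀ j, 0 ≤ j → j < K → 1 ≤ dget d j)
    (hpos0 : 0 ≤ pos) (hposK : pos < K)
    (htgt0 : 0 ≤ tgt) (htgtK : tgt < K)
    (hw : 0 ≤ w)
    (st : Array Int × Bool)
    (hst : st = if dget d pos + w < dget d tgt
                then (dset d tgt (dget d pos + w), true)
                else (d, b)) :
    st.1.size = K.toNat ∧
    (∀ j, 0 ≤ j → j < K → 1 ≤ dget st.1 j) ∧
    ple K st.1 d ∧
    dget st.1 pos = dget d pos ∧
    dget st.1 tgt ≤ dget d pos + w ∧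
    (st.2 = false → st.1 = d ∧ b = false) ∧
    sumA st.1 ≤ sumA d ∧
    (b = false → st.2 = true → sumA st.1 < sumA d) ∧
    (∀ d', relaxedAll K d' → ple K d' d → dget d' tgt ≤ dget d' pos + w → ple K d' st.1) := by
  have hlenI : (d.size : Int) = K := by omega
  have htgtI : tgt < (d.size : Int) := by omega
  have hdp1 : 1 ≤ dget d pos := hent pos hpos0 hposK
  by_cases hc : dget d pos + w < dget d tgt
  · simp only [hst, if_pos hc]
    have hget : ∀ j, 0 ≤ j → j < K →
        dget (dset d tgt (dget d pos + w)) j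
          = if j = tgt then dget d pos + w else dget d j := by
      intro j hj0 hjK
      exact dget_dset d tgt j _ htgt0 htgtI hj0 (by omega)
    have hnp : pos ≠ tgt := by intro h; rw [h] at hc; omega
    refine ⟨?_, ?_, ?_, ?_, ?_, ?_, ?_, ?_, ?_⟩
    · rw [size_dset]; exact hlen
    · intro j hj0 hjK
      rw [hget j hj0 hjK]
      split_ifs with h
      · omega
      · exact hent j hj0 hjK
    · intro j hj0 hjK
      rw [hget j hj0 hjK]
      split_ifs with h
      · subst h; omega
      · exact le_refl _
    · rw [hget pos hpos0 hposK, if_neg hnp]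
    · rw [hget tgt htgt0 htgtK, if_pos rfl]
    · intro h; simp at h
    · exact le_of_lt (sumA_dset_lt d tgt (dget d pos + w) htgt0 htgtI (by omega) hc)
    · intro _ _; exact sumA_dset_lt d tgt (dget d pos + w) htgt0 htgtI (by omega) hc
    · intro d' hrel hled htri j hj0 hjK
      rw [hget j hj0 hjK]
      split_ifs with h
      · subst h
        exact le_trans htri (by have := hled pos hpos0 hposK; omega)
      · exact hled j hj0 hjK
  · simp only [hst, if_neg hc]
    refine ⟨hlen, hent, ple_refl K d, by trivial, by omega,
      fun _ => ⟨by trivial, by assumption⟩, le_refl _, by intro h h'; rw [h] at h'; simp at h',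
      fun d' _ hled _ => hled⟩

lemma sweepStep_props (K : Int) (hK0 : 0 < K) (d : Array Int) (b : Bool) (pos : Int)
    (hlen : d.size = K.toNat) (hent : ∀ j, 0 ≤ j → j < K → 1 ≤ dget d j)
    (hpos0 : 0 ≤ pos) (hposK : pos < K) :
    (sweepStep K (d, b) pos).1.size = K.toNat ∧
    (∀ j, 0 ≤ j → j < K → 1 ≤ dget (sweepStep K (d, b) pos).1 j) ∧
    ple K (sweepStep K (d, b) pos).1 d ∧
    (∀ d', relaxedAll K d' → ple K d' d → ple K d' (sweepStep K (d, b) pos).1) ∧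
    ((sweepStep K (d, b) pos).2 = false →
      (sweepStep K (d, b) pos).1 = d ∧ b = false ∧ relaxedAt K d pos) ∧
    sumA (sweepStep K (d, b) pos).1 ≤ sumA d ∧
    (b = false → (sweepStep K (d, b) pos).2 = true → sumA (sweepStep K (d, b) pos).1 < sumA d) := by
  set u := PySem.Int.mod (pos + 1) K with hu_def
  set v := PySem.Int.mod (10 * pos) K with hv_def
  have hu0 : 0 ≤ u := PySem.Int.mod_nonneg _ hK0
  have huK : u < K := PySem.Int.mod_lt _ hK0
  have hv0 : 0 ≤ v := PySem.Int.mod_nonneg _ hK0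
  have hvK : v < K := PySem.Int.mod_lt _ hK0
  set s1 := (if dget d pos + 1 < dget d u
      then (dset d u (dget d pos + 1), true) else (d, b)) with hs1
  obtain ⟨l1, e1, p1, f1, ed1, ff1, sl1, slt1, pres1⟩ :=
    brelax K hK0 d b pos u 1 hlen hent hpos0 hposK hu0 huK (by omega) s1 hs1
  set s2 := (if dget s1.1 pos < dget s1.1 v
      then (dset s1.1 v (dget s1.1 pos), true) else s1) with hs2
  obtain ⟨l2, e2, p2, f2, ed2, ff2, sl2, slt2, pres2⟩ :=
    brelax K hK0 s1.1 s1.2 pos v 0 l1 e1 hpos0 hposK hv0 hvK (le_refl 0) s2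
      (by rw [hs2]; norm_num)
  have hunf : sweepStep K (d, b) pos = s2 := by
    rw [sweepStep]
  rw [hunf]
  refine ⟨l2, e2, ple_trans p2 p1, ?_, ?_, le_trans sl2 sl1, ?_⟩
  · intro d' hrel hled
    have hrp := hrel pos hpos0 hposK
    have e1' : dget d' u ≤ dget d' pos + 1 := by rw [hu_def]; exact hrp.1
    have e2' : dget d' v ≤ dget d' pos + 0 := by rw [hv_def]; have := hrp.2; omega
    exact pres2 d' hrel (pres1 d' hrel hled e1') e2'
  · intro h
    obtain ⟨h21, h22⟩ := ff2 h
    obtain ⟨h11, h12⟩ := ff1 h22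
    refine ⟨by rw [h21, h11], h12, ?_, ?_⟩
    · rw [← hu_def, ← h11]
      have := ed1
      omega
    · rw [← hv_def, ← h11]
      rw [h21] at ed2
      omega
  · intro hb hflag
    by_cases h1 : s1.2 = true
    · have := slt1 hb h1
      omega
    · have h1' : s1.2 = false := by simpa using h1
      obtain ⟨h11, _⟩ := ff1 h1'
      have := slt2 h1' hflag
      rw [h11] at this
      omega

lemma sweep_fold (K : Int) (hK0 : 0 < K) :
    ∀ (xs : List Int) (d : Array Int) (b : Bool),
    (∀ x ∈ xs, 0 ≤ x ∧ x < K) →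
    d.size = K.toNat →
    (∀ j, 0 ≤ j → j < K → 1 ≤ dget d j) →
    ((xs.foldl (sweepStep K) (d, b)).1.size = K.toNat) ∧
    (∀ j, 0 ≤ j → j < K → 1 ≤ dget (xs.foldl (sweepStep K) (d, b)).1 j) ∧
    ple K (xs.foldl (sweepStep K) (d, b)).1 d ∧
    (∀ d', relaxedAll K d' → ple K d' d → ple K d' (xs.foldl (sweepStep K) (d, b)).1) ∧
    ((xs.foldl (sweepStep K) (d, b)).2 = false →
      (xs.foldl (sweepStep K) (d, b)).1 = d ∧ b = false ∧ ∀ x ∈ xs, relaxedAt K d x) ∧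
    sumA (xs.foldl (sweepStep K) (d, b)).1 ≤ sumA d ∧
    (b = false → (xs.foldl (sweepStep K) (d, b)).2 = true →
      sumA (xs.foldl (sweepStep K) (d, b)).1 < sumA d) := by
  intro xs
  induction xs with
  | nil =>
    intro d b _ hlen hent
    refine ⟨hlen, hent, ple_refl K d, fun d' _ h => h, fun h => ⟨rfl, ?_, by simp⟩,
      le_refl _, by intro h h'; simp_all⟩
    simpa using h
  | cons x xs ih =>
    intro d b hxs hlen hent
    have hx := hxs x (by simp)
    obtain ⟨l1, e1, p1, pr1, ff1, sl1, slt1⟩ :=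
      sweepStep_props K hK0 d b x hlen hent hx.1 hx.2
    have hfold : (x :: xs).foldl (sweepStep K) (d, b)
        = xs.foldl (sweepStep K) ((sweepStep K (d, b) x).1, (sweepStep K (d, b) x).2) := by
      simp [List.foldl_cons]
    obtain ⟨L, E, P, Pr, FF, SL, SLT⟩ :=
      ih (sweepStep K (d, b) x).1 (sweepStep K (d, b) x).2
        (fun y hy => hxs y (by simp [hy])) l1 e1
    rw [hfold]
    refine ⟨L, E, ple_trans P p1, ?_, ?_, le_trans SL sl1, ?_⟩
    · intro d' hrel hled
      exact Pr d' hrel (pr1 d' hrel hled)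
    · intro h
      obtain ⟨hF1, hF2, hF3⟩ := FF h
      obtain ⟨h11, h12, h13⟩ := ff1 hF2
      refine ⟨by rw [hF1, h11], h12, ?_⟩
      intro y hy
      rcases List.mem_cons.mp hy with h | h
      · subst h; exact h13
      · rw [h11] at hF3
        exact hF3 y h
    · intro hb hflag
      by_cases h1 : (sweepStep K (d, b) x).2 = true
      · have := slt1 hb h1
        omega
      · have h1' : (sweepStep K (d, b) x).2 = false := by simpa using h1
        obtain ⟨h11, _⟩ := ff1 h1'
        have := SLT h1' hflag
        have h2 : sumA (sweepStep K (d, b) x).1 = sumA d := by rw [h11]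
        omega

theorem bLoop_main (K : Int) (hK : 2 ≤ K) :
    ∀ (fuel : Nat) (d : Array Int),
    d.size = K.toNat →
    (∀ j, 0 ≤ j → j < K → 1 ≤ dget d j) →
    sumA d ≤ fuel →
    (bLoop K fuel d).size = K.toNat ∧
    relaxedAll K (bLoop K fuel d) ∧
    ple K (bLoop K fuel d) d ∧
    (∀ d', relaxedAll K d' → ple K d' d → ple K d' (bLoop K fuel d)) := by
  intro fuel
  induction fuel with
  | zero =>
    intro d hlen hent hsum
    exfalso
    have := sumA_pos K hK d hlen hent
    omega
  | succ fuel ih =>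
    intro d hlen hent hsum
    have hK0 : (0:Int) < K := by omega
    have hmem : ∀ x ∈ PySem.List.pyRange 0 K 1, 0 ≤ x ∧ x < K := by
      intro x hx
      exact PySem.List.mem_pyRange_one.mp hx
    obtain ⟨L, E, P, Pr, FF, SL, SLT⟩ :=
      sweep_fold K hK0 (PySem.List.pyRange 0 K 1) d false hmem hlen hent
    have hunf : bLoop K (fuel + 1) d =
        if ((PySem.List.pyRange 0 K 1).foldl (sweepStep K) (d, false)).2
        then bLoop K fuel ((PySem.List.pyRange 0 K 1).foldl (sweepStep K) (d, false)).1
        else ((PySem.List.pyRange 0 K 1).foldl (sweepStep K) (d, false)).1 := by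
      rw [bLoop]
    rw [hunf]
    by_cases hflag : ((PySem.List.pyRange 0 K 1).foldl (sweepStep K) (d, false)).2 = true
    · rw [if_pos hflag]
      have hlt := SLT rfl hflag
      obtain ⟨L2, R2, P2, Pr2⟩ := ih _ L E (by omega)
      exact ⟨L2, R2, ple_trans P2 P, fun d' hrel hled => Pr2 d' hrel (Pr d' hrel hled)⟩
    · have hflag' : ((PySem.List.pyRange 0 K 1).foldl (sweepStep K) (d, false)).2 = false := by
        simpa using hflag
      rw [if_neg (by simp [hflag'])]
      obtain ⟨hF1, _, hF3⟩ := FF hflag'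
      rw [hF1]
      refine ⟨hlen, ?_, ple_refl K d, fun d' _ h => h⟩
      intro pos h0 hK'
      exact hF3 pos (PySem.List.mem_pyRange_one.mpr ⟨h0, hK'⟩)

-- ===== VERDICT (by name: the statement is the Claim_ definition above) =====
set_option maxRecDepth 65536 in
theorem find_min_digit_sum_spec : Claim_equal_find_min_digit_sum := by
  intro K _ hpre
  have hK : 2 ≤ K := hpre
  have hK0 : (0:Int) < K := by omega
  have hn2 : 2 ≤ K.toNat := by omega
  unfold Spec_find_min_digit_sum
  show dget (spfaLoop K (K.toNat * 1000000000 + 2)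
        (dset (Array.replicate K.toNat (1000000000:Int)) 1 1) [1]) 0
    = dget (bLoop K (K.toNat * 1000000000 + 2)
        (dset (Array.replicate K.toNat (1000000000:Int)) 1 1)) 0
  set init := dset (Array.replicate K.toNat (1000000000:Int)) 1 1 with hinit
  have hlen : init.size = K.toNat := by
    rw [hinit, size_dset, Array.size_replicate]
  have hgi : ∀ j, 0 ≤ j → j < K → dget init j = if j = 1 then 1 else 1000000000 := by
    intro j hj0 hjK
    have h := dget_dset (Array.replicate K.toNat (1000000000:Int)) 1 j 1
      (by norm_num) (by simp [Array.size_replicate]; omega) hj0 (by simp [Array.size_replicate]; omega)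
    rw [← hinit] at h
    rw [h]
    split_ifs with hj1
    · rfl
    · rw [dget_eq_getElem _ j hj0 (by simp [Array.size_replicate]; omega)]
      simp
  have hent : ∀ j, 0 ≤ j → j < K → 1 ≤ dget init j := by
    intro j hj0 hjK
    rw [hgi j hj0 hjK]
    split_ifs <;> omega
  have hq : ∀ x ∈ ([1] : List Int), 0 ≤ x ∧ x < K := by
    intro x hx
    simp at hx
    subst hx
    exact ⟨by omega, by omega⟩
  have hI : ∀ x, 0 ≤ x → x < K → relaxedAt K init x ∨ x ∈ ([1] : List Int) := by
    intro x hx0 hxK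
    by_cases hx1 : x = 1
    · right; simp [hx1]
    · left
      have hxv := hgi x hx0 hxK
      rw [if_neg hx1] at hxv
      constructor
      · rw [hgi _ (PySem.Int.mod_nonneg _ hK0) (PySem.Int.mod_lt _ hK0), hxv]
        split_ifs <;> omega
      · rw [hgi _ (PySem.Int.mod_nonneg _ hK0) (PySem.Int.mod_lt _ hK0), hxv]
        split_ifs <;> omega
  have hsumi : sumA init ≤ K.toNat * 1000000000 := by
    have h1n : 1 < K.toNat := by omega
    have htl : init.toList = (List.replicate K.toNat (1000000000:Int)).set 1 1 := by
      rw [hinit]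
      unfold dset
      rw [Array.toList_setIfInBounds, Array.toList_replicate]
      norm_num
    have hrep : sumT (List.replicate K.toNat (1000000000:Int)) = K.toNat * 1000000000 := by
      simp [sumT, List.map_replicate, List.sum_replicate]
    have hss := sumT_set (List.replicate K.toNat (1000000000:Int)) 1 1 (by simpa using h1n)
    rw [List.getElem_replicate] at hss
    rw [hrep] at hss
    unfold sumA
    rw [htl]
    omega
  have hsq : sumA init + ([1] : List Int).length ≤ K.toNat * 1000000000 + 2 := by
    simp only [List.length_cons, List.length_nil]
    omega
  have hsb : sumA init ≤ K.toNat * 1000000000 + 2 := le_trans hsumi (Nat.le_add_right _ 2)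
  obtain ⟨LA, RA, PA, PrA⟩ :=
    spfa_main K hK (K.toNat * 1000000000 + 2) init [1] hlen hent hq hI hsq
  obtain ⟨LB, RB, PB, PrB⟩ :=
    bLoop_main K hK (K.toNat * 1000000000 + 2) init hlen hent hsb
  have hAB := PrB _ RA PA
  have hBA := PrA _ RB PB
  have h1 := hAB 0 (le_refl 0) hK0
  have h2 := hBA 0 (le_refl 0) hK0
  exact le_antisymm h1 h2
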